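-- pv_equiv track=rewrite | github.com/ahnjj/Algorithm | 프로그래머스/lv1/72410. 신규 아이디 추천/신규 아이디 추천.py | solution
-- ===== SOURCE A (Python) =====
-- def solution(new_id):
--     ans = ''
--     tmp = ''
--     # 1
--     new_id = new_id.lower()
--
--     # 2
--     for i in new_id:
--         if i.isalpha() or i.isdigit() or i in ('-','_', '.'):
--             tmp += i
--
--
--     # 3
--     for idx in range(len(tmp)):
--         if tmp[idx:idx+2] == '..':
--             ans += '.'
--         else:
--             ans += tmp[idx]
--         ans = ans.replace('..','.')
--
--     # 4
--     ans = ans.strip('.')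
--
--     # 5
--     if ans == '':
--         ans += 'a'
--
--     # 6
--     ans = ans[:15]
--     ans = ans.rstrip('.')
--
--     # 7
--     if len(ans) <= 2:
--         ans += ans[-1]*(3-len(ans))
--
--     return ans
-- ===== SOURCE B (Python) =====
-- def solution(new_id):
--     # single pass: lowercase, filter allowed chars, and collapse dot runs on the fly
--     out = []
--     for ch in new_id:
--         c = ch.lower()
--         if c.isalpha() or c.isdigit() or c in '-_.':
--             if c == '.' and out and out[-1] == '.':
--                 continue
--             out.append(c)
--     s = ''.join(out).strip('.') or 'a'
--     s = s[:15].rstrip('.')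
--     if len(s) < 3:
--         s = (s + s[-1] * 2)[:3]
--     return s
-- ===== Notes on version B (the rewrite author's own statement) =====
-- stated objective: faster
-- what changed: A filters in one pass, then runs an index loop whose redundant two-char-slice test and per-iteration whole-accumulator replace('..','.') collapse dot runs; B does lowering, filtering and dot-run collapsing in a single left-to-right pass that just skips a '.' following a kept '.'.
import Mathlib
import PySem

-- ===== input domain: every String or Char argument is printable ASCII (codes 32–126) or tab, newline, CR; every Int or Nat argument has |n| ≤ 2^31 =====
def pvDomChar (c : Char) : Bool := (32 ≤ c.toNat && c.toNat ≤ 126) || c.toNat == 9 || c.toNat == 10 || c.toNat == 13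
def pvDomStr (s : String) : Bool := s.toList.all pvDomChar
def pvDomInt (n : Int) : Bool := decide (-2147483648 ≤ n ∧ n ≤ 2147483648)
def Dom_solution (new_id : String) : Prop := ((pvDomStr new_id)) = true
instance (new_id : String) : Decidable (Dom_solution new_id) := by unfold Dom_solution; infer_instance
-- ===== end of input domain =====

-- B replaces A's three sequential passes (filter pass, then an index loop that runs a
-- whole-accumulator replace('..','.') on every iteration) by ONE left-to-right pass that
-- lowers, filters and collapses dot runs on the fly; objective: faster (constant factor).

-- shared helper: the character test `i.isalpha() or i.isdigit() or i in ('-','_','.')`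
-- (this line is identical in both Pythons)
def pvAllowed (c : Char) : Bool :=
  PySem.Chars.isalpha c || PySem.Chars.isdigit c || (c == '-' || c == '_' || c == '.')

-- ===== PORT A =====
def solution (new_id : String) : String :=
  -- 1: new_id = new_id.lower()
  let nid := PySem.Chars.lower new_id.toList
  -- 2: tmp += i for the allowed i
  let tmp := nid.foldl (fun t c => if pvAllowed c then t ++ [c] else t) ([] : List Char)
  -- 3: for idx in range(len(tmp)): … ; ans = ans.replace('..','.')
  let ans := (PySem.List.pyRange 0 (PySem.List.len tmp) 1).foldl
      (fun a idx =>
        let a := if PySem.List.slice tmp (some idx) (some (idx + 2)) = ['.', '.']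
                 then a ++ ['.']
                 else a ++ [PySem.List.pyGetD tmp idx ' ']   -- tmp[idx]; idx is always in range
        PySem.Chars.replace a ['.', '.'] ['.'])
      ([] : List Char)
  -- 4: ans = ans.strip('.')
  let ans := PySem.Chars.stripChars ans ['.']
  -- 5: if ans == '': ans += 'a'
  let ans := if ans = [] then ans ++ ['a'] else ans
  -- 6: ans = ans[:15]; ans = ans.rstrip('.')
  let ans := PySem.List.slice ans none (some 15)
  let ans := (ans.reverse.dropWhile (fun c => c == '.')).reverse  -- rstrip('.'): drop trailing dots (exact)
  -- 7: if len(ans) <= 2: ans += ans[-1]*(3-len(ans))   (ans is provably nonempty here, so the pyGetD default is never used)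
  let ans := if ans.length ≤ 2
             then ans ++ List.replicate (3 - ans.length) (PySem.List.pyGetD ans (-1) ' ')
             else ans
  String.ofList ans

-- ===== PORT B =====
def solution_alt (new_id : String) : String :=
  -- one pass: lower each char, keep the allowed ones, skip a '.' that follows a kept '.'
  let out := new_id.toList.foldl
      (fun acc ch =>
        let c := PySem.Chars.lowerChar ch
        if pvAllowed c then
          if c == '.' && acc.getLast? == some '.' then acc else acc ++ [c]
        else acc)
      ([] : List Char)
  -- s = ''.join(out).strip('.') or 'a'
  let s := PySem.Chars.stripChars out ['.']
  let s := if s = [] then ['a'] else s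
  -- s = s[:15].rstrip('.')
  let s := ((PySem.List.slice s none (some 15)).reverse.dropWhile (fun c => c == '.')).reverse
  -- if len(s) < 3: s = (s + s[-1]*2)[:3]   (s is provably nonempty here, so the pyGetD default is never used)
  let s := if s.length < 3
           then (s ++ List.replicate 2 (PySem.List.pyGetD s (-1) ' ')).take 3
           else s
  String.ofList s

-- ===== PRECONDITION & SPEC =====
def Spec_solution (new_id : String) (out : String) : Prop := out = solution_alt new_id
instance (new_id : String) (out : String) : Decidable (Spec_solution new_id out) := by unfold Spec_solution; infer_instance

-- ===== CLAIM (what is proved, stated in full; the proofs are below) =====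
def Claim_equal_solution : Prop := ∀ (new_id : String), Dom_solution new_id → Spec_solution new_id (solution new_id)

-- ===== LEMMAS AND PROOFS =====
def pvHasDD : List Char → Bool
  | x :: y :: t => (x == '.' && y == '.') || pvHasDD (y :: t)
  | _ => false

theorem pvHasDD_cons_of_tail {c : Char} {t : List Char} (h : pvHasDD t = true) :
    pvHasDD (c :: t) = true := by
  cases t with
  | nil => simp [pvHasDD] at h
  | cons y t => simp [pvHasDD, h]

theorem pvHasDD_append_singleton (a : List Char) (c : Char) :
    pvHasDD (a ++ [c]) = (pvHasDD a || (a.getLast? == some '.' && c == '.')) := by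
  induction a with
  | nil => simp [pvHasDD]
  | cons x a ih =>
    cases a with
    | nil => simp [pvHasDD, Bool.or_comm]
    | cons y a =>
      show pvHasDD (x :: ((y :: a) ++ [c])) = _
      rw [show x :: ((y :: a) ++ [c]) = x :: y :: (a ++ [c]) from rfl]
      rw [pvHasDD, show y :: (a ++ [c]) = (y :: a) ++ [c] from rfl, ih]
      simp [pvHasDD, Bool.or_assoc]

theorem pv_go_nil (fuel : Nat) (acc : List Char) :
    PySem.Chars.replace.go ['.', '.'] ['.'] fuel [] acc = acc.reverse := by
  cases fuel <;> simp [PySem.Chars.replace.go]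

theorem pv_go_cons (f : Nat) (c : Char) (t acc : List Char) :
    PySem.Chars.replace.go ['.', '.'] ['.'] (f+1) (c :: t) acc =
      if List.isPrefixOf ['.', '.'] (c :: t)
      then PySem.Chars.replace.go ['.', '.'] ['.'] f ((c :: t).drop 2) ('.' :: acc)
      else PySem.Chars.replace.go ['.', '.'] ['.'] f t (c :: acc) := rfl

theorem pv_go_noDD (l : List Char) : ∀ (fuel : Nat) (acc : List Char),
    l.length ≤ fuel → pvHasDD l = false →
    PySem.Chars.replace.go ['.', '.'] ['.'] fuel l acc = acc.reverse ++ l := by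
  induction l with
  | nil => intro fuel acc _ _; simp [pv_go_nil]
  | cons c t ih =>
    intro fuel acc hf hdd
    cases fuel with
    | zero => simp at hf
    | succ f =>
      have hnp : List.isPrefixOf ['.', '.'] (c :: t) = false := by
        cases t with
        | nil => simp [List.isPrefixOf]
        | cons y t' =>
          simp only [pvHasDD, Bool.or_eq_false_iff, beq_eq_false_iff_ne, ne_eq,
            Bool.and_eq_false_iff] at hdd
          simp [List.isPrefixOf]
          intro hc hy
          rcases hdd.1 with h | h
          · exact absurd hc.symm h
          · exact absurd hy.symm h
      have hdt : pvHasDD t = false := by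
        by_contra h
        have := pvHasDD_cons_of_tail (c := c) (Bool.of_not_eq_false h)
        simp [this] at hdd
      rw [pv_go_cons, hnp]
      simp only [Bool.false_eq_true, if_false]
      rw [ih f (c :: acc) (by simpa using Nat.le_of_succ_le_succ hf) hdt]
      simp

theorem pv_go_snoc_dd (b : List Char) : ∀ (fuel : Nat) (acc : List Char),
    b.length + 2 ≤ fuel → pvHasDD (b ++ ['.']) = false →
    PySem.Chars.replace.go ['.', '.'] ['.'] fuel (b ++ ['.', '.']) acc = acc.reverse ++ b ++ ['.'] := by
  induction b with
  | nil =>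
    intro fuel acc hf _
    cases fuel with
    | zero => omega
    | succ f =>
      rw [List.nil_append, pv_go_cons]
      simp [List.isPrefixOf, pv_go_nil]
  | cons c b ih =>
    intro fuel acc hf hdd
    cases fuel with
    | zero => omega
    | succ f =>
      rw [List.cons_append, pv_go_cons]
      have hnp : List.isPrefixOf ['.', '.'] (c :: (b ++ ['.', '.'])) = false := by
        cases b with
        | nil =>
          have hdd' : pvHasDD [c, '.'] = false := by simpa using hdd
          simp [pvHasDD] at hdd'
          simp [List.isPrefixOf]
          intro hc
          exact absurd hc.symm hdd'
        | cons y b' =>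
          have hdd' : pvHasDD (c :: y :: (b' ++ ['.'])) = false := by
            simpa using hdd
          simp only [pvHasDD, Bool.or_eq_false_iff, beq_eq_false_iff_ne, ne_eq,
            Bool.and_eq_false_iff] at hdd'
          simp [List.isPrefixOf]
          intro hc hy
          rcases hdd'.1 with h | h
          · exact absurd hc.symm h
          · exact absurd hy.symm h
      rw [hnp]
      simp only [Bool.false_eq_true, if_false]
      have hdt : pvHasDD (b ++ ['.']) = false := by
        by_contra h
        have := pvHasDD_cons_of_tail (c := c) (Bool.of_not_eq_false h)
        simp [this] at hdd
      rw [ih f (c :: acc) (by simpa using Nat.le_of_succ_le_succ hf) hdt]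
      simp

theorem pv_replace_noDD {l : List Char} (h : pvHasDD l = false) :
    PySem.Chars.replace l ['.', '.'] ['.'] = l := by
  rw [PySem.Chars.replace]
  simp only [List.isEmpty_cons, Bool.false_eq_true, if_false]
  simpa using pv_go_noDD l l.length [] le_rfl h

theorem pv_replace_snoc_dd {b : List Char} (h : pvHasDD (b ++ ['.']) = false) :
    PySem.Chars.replace (b ++ ['.', '.']) ['.', '.'] ['.'] = b ++ ['.'] := by
  rw [PySem.Chars.replace]
  simp only [List.isEmpty_cons, Bool.false_eq_true, if_false]
  have := pv_go_snoc_dd b (b ++ ['.', '.']).length [] (by simp) h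
  simpa using this

theorem pv_step_eq (a : List Char) (c : Char) (h : pvHasDD a = false) :
    PySem.Chars.replace (a ++ [c]) ['.', '.'] ['.'] =
      (if c == '.' && a.getLast? == some '.' then a else a ++ [c]) := by
  by_cases hc : (c == '.' && a.getLast? == some '.') = true
  · simp only [hc, if_true]
    obtain ⟨hc1, hc2⟩ := Bool.and_eq_true_iff.mp hc
    obtain ⟨b, rfl⟩ := List.getLast?_eq_some_iff.mp (by simpa using hc2)
    have hc1' : c = '.' := by simpa using hc1
    subst hc1'
    rw [show (b ++ ['.']) ++ ['.'] = b ++ ['.', '.'] by simp]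
    exact pv_replace_snoc_dd h
  · have hx : (c == '.' && a.getLast? == some '.') = false := Bool.eq_false_iff.mpr hc
    rw [if_neg hc]
    apply pv_replace_noDD
    rw [pvHasDD_append_singleton, h, Bool.false_or, Bool.and_comm]
    exact hx

theorem pv_step_noDD (a : List Char) (c : Char) (h : pvHasDD a = false) :
    pvHasDD (if c == '.' && a.getLast? == some '.' then a else a ++ [c]) = false := by
  by_cases hc : (c == '.' && a.getLast? == some '.') = true
  · simpa [hc]
  · have hx : (c == '.' && a.getLast? == some '.') = false := Bool.eq_false_iff.mpr hc
    rw [if_neg hc, pvHasDD_append_singleton, h, Bool.false_or, Bool.and_comm]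
    exact hx

theorem pv_fold_eq (l : List Char) : ∀ (a : List Char), pvHasDD a = false →
    l.foldl (fun a c => PySem.Chars.replace (a ++ [c]) ['.', '.'] ['.']) a =
      l.foldl (fun a c => if c == '.' && a.getLast? == some '.' then a else a ++ [c]) a := by
  induction l with
  | nil => intro a _; rfl
  | cons c t ih =>
    intro a h
    simp only [List.foldl_cons]
    rw [pv_step_eq a c h]
    exact ih _ (pv_step_noDD a c h)

theorem pv_b_loop (l : List Char) : ∀ (a : List Char),
    l.foldl
      (fun acc ch =>
        let c := PySem.Chars.lowerChar ch
        if pvAllowed c then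
          if c == '.' && acc.getLast? == some '.' then acc else acc ++ [c]
        else acc) a =
    ((l.map PySem.Chars.lowerChar).filter pvAllowed).foldl
      (fun a c => if c == '.' && a.getLast? == some '.' then a else a ++ [c]) a := by
  induction l with
  | nil => intro a; rfl
  | cons ch t ih =>
    intro a
    simp only [List.foldl_cons, List.map_cons, List.filter_cons]
    by_cases hp : pvAllowed (PySem.Chars.lowerChar ch) = true
    · simp only [hp, if_true, List.foldl_cons]
      exact ih _
    · have hp' : pvAllowed (PySem.Chars.lowerChar ch) = false := Bool.eq_false_iff.mpr hp
      simp only [hp', Bool.false_eq_true, if_false]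
      exact ih a

theorem pv_slice_redundant (tmp : List Char) (a : List Char) {idx : Int}
    (h0 : 0 ≤ idx) (h1 : idx < (tmp.length : Int)) :
    (if PySem.List.slice tmp (some idx) (some (idx + 2)) = ['.', '.']
     then a ++ ['.'] else a ++ [PySem.List.pyGetD tmp idx ' ']) =
    a ++ [PySem.List.pyGetD tmp idx ' '] := by
  by_cases hs : PySem.List.slice tmp (some idx) (some (idx + 2)) = ['.', '.']
  · simp only [hs, if_true]
    obtain ⟨k, rfl⟩ := Int.eq_ofNat_of_zero_le h0
    rw [show ((k : Int) + 2) = ((k + 2 : Nat) : Int) by push_cast; ring] at hs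
    rw [PySem.List.slice_natCast] at hs
    have hk : k < tmp.length := by exact_mod_cast h1
    rw [PySem.List.pyGetD_eq_getElem tmp ' ' h0 h1]
    have hhd : (List.take (k + 2 - k) (List.drop k tmp)).head? = some '.' := by
      rw [hs]; rfl
    rw [List.head?_take, if_neg (by omega), List.head?_drop,
        List.getElem?_eq_getElem hk] at hhd
    simp only [Option.some.injEq] at hhd
    simp [hhd]
  · simp [hs]

theorem pv_strip_head (l : List Char) {x : Char}
    (h : (PySem.Chars.stripChars l ['.']).head? = some x) : x ≠ '.' := by
  rw [PySem.Chars.stripChars] at h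
  set p := fun c => List.contains ['.'] c with hp
  set u := List.dropWhile p l with hu
  set r := List.dropWhile p u.reverse with hr
  have hrne : r ≠ [] := by
    intro hnil
    rw [hnil] at h; simp at h
  rw [← List.getLast?_reverse] at h
  rw [List.reverse_reverse] at h
  obtain ⟨pre, hpre⟩ := (List.dropWhile_suffix (l := u.reverse) p)
  have hgl : u.reverse.getLast? = r.getLast? := by
    rw [← hpre, List.getLast?_append]
    cases hrl : r.getLast? with
    | none => exact absurd (List.getLast?_eq_none_iff.mp hrl) hrne
    | some y => simp
  rw [← hgl, List.getLast?_reverse] at h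
  have hune : u ≠ [] := by
    intro hnil; rw [hnil] at h; simp at h
  have hhead : p (u.head hune) = false := List.head_dropWhile_not p hune
  rw [List.head?_eq_some_head hune] at h
  have hx : u.head hune = x := by injection h
  rw [hx] at hhead
  intro hxe
  rw [hxe] at hhead
  simp [hp] at hhead

theorem pv_rstrip_ne_nil {m : List Char} (hne : m ≠ [])
    (hh : ∀ x, m.head? = some x → x ≠ '.') :
    ((List.take 15 m).reverse.dropWhile (fun c => c == '.')).reverse ≠ [] := by
  cases m with
  | nil => exact absurd rfl hne
  | cons h t =>
    have hh' : h ≠ '.' := hh h rfl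
    simp only [List.take_succ_cons, List.reverse_cons, ne_eq, List.reverse_eq_nil_iff]
    intro hnil
    have := List.dropWhile_eq_nil_iff.mp hnil h (by simp)
    simp at this
    exact hh' this

theorem pv_finish_eq (l : List Char) :
    (let ans := PySem.Chars.stripChars l ['.']
     let ans := if ans = [] then ans ++ ['a'] else ans
     let ans := PySem.List.slice ans none (some 15)
     let ans := (ans.reverse.dropWhile (fun c => c == '.')).reverse
     if ans.length ≤ 2
     then ans ++ List.replicate (3 - ans.length) (PySem.List.pyGetD ans (-1) ' ')
     else ans) =
    (let s := PySem.Chars.stripChars l ['.']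
     let s := if s = [] then ['a'] else s
     let s := ((PySem.List.slice s none (some 15)).reverse.dropWhile (fun c => c == '.')).reverse
     if s.length < 3
     then (s ++ List.replicate 2 (PySem.List.pyGetD s (-1) ' ')).take 3
     else s) := by
  have he : (if PySem.Chars.stripChars l ['.'] = [] then PySem.Chars.stripChars l ['.'] ++ ['a']
             else PySem.Chars.stripChars l ['.']) =
            (if PySem.Chars.stripChars l ['.'] = [] then ['a'] else PySem.Chars.stripChars l ['.']) := by
    split <;> simp_all
  simp only [he]
  set m := (if PySem.Chars.stripChars l ['.'] = [] then ['a'] else PySem.Chars.stripChars l ['.']) with hm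
  have hmne : m ≠ [] := by
    rw [hm]; split <;> simp_all
  have hmh : ∀ x, m.head? = some x → x ≠ '.' := by
    intro x hx
    rw [hm] at hx
    split at hx
    · simp at hx; subst hx; decide
    · exact pv_strip_head l hx
  rw [PySem.List.slice_to m (by norm_num)]
  rw [show ((15:Int)).toNat = 15 from rfl]
  have hne := pv_rstrip_ne_nil hmne hmh
  set r := ((List.take 15 m).reverse.dropWhile (fun c => c == '.')).reverse with hrdef
  match hr : r, hne with
  | [a], _ => simp [PySem.List.pyGetD, PySem.List.pyGet?, PySem.List.pyIdx?, List.replicate]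
  | [a, b], _ => simp [PySem.List.pyGetD, PySem.List.pyGet?, PySem.List.pyIdx?, List.replicate]
  | a :: b :: c :: t, _ =>
      rw [if_neg (by simp), if_neg (by simp)]


-- ===== VERDICT (by name: the statement is the Claim_ definition above) =====
theorem solution_spec : Claim_equal_solution := by
  intro new_id _
  unfold Spec_solution solution solution_alt
  have hfilter : (PySem.Chars.lower new_id.toList).foldl
      (fun t c => if pvAllowed c then t ++ [c] else t) ([] : List Char) =
      (PySem.Chars.lower new_id.toList).filter pvAllowed := by
    simpa using PySem.List.foldl_append_if pvAllowed (fun c => c) (PySem.Chars.lower new_id.toList) []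
  simp only [hfilter]
  set tmp := (PySem.Chars.lower new_id.toList).filter pvAllowed with htmp
  have h3 : (PySem.List.pyRange 0 (PySem.List.len tmp) 1).foldl
      (fun a idx =>
        PySem.Chars.replace
          (if PySem.List.slice tmp (some idx) (some (idx + 2)) = ['.', '.']
           then a ++ ['.']
           else a ++ [PySem.List.pyGetD tmp idx ' ']) ['.', '.'] ['.']) ([] : List Char) =
      tmp.foldl (fun a c => if c == '.' && a.getLast? == some '.' then a else a ++ [c]) [] := by
    rw [PySem.List.foldl_congr_mem _ _
        (fun a idx => PySem.Chars.replace (a ++ [PySem.List.pyGetD tmp idx ' ']) ['.', '.'] ['.']) []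
        (by
          intro acc idx hidx
          have hb := PySem.List.mem_pyRange_one.mp (by simpa using hidx)
          simp only [pv_slice_redundant tmp acc hb.1 hb.2])]
    rw [PySem.List.foldl_pyRange_zero_pyGetD tmp ' '
        (fun a c => PySem.Chars.replace (a ++ [c]) ['.', '.'] ['.']) []]
    exact pv_fold_eq tmp [] rfl
  simp only [h3]
  have hb := pv_b_loop new_id.toList ([] : List Char)
  simp only [hb]
  exact congrArg String.ofList (pv_finish_eq _)
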